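-- pv_equiv track=rewrite | github.com/lMoonHawk/AoC-py | 2019/day_04.py | two_consec
-- ===== SOURCE A (Python) =====
-- def two_consec(s: str) -> bool:
--     """Returns True if there a string of exactly 2 consecutive chars.
--     Faster than ORing each case:
--     d[0] == d[1] != d[2]
--     or any(d[i] != d[i + 1] == d[i + 2] != d[i + 3] for i in range(len(d) - 3))
--     or d[-3] != d[-2] == d[-1]"""
--     prev_digit, count = None, 0
--     for digit in s:
--         if digit == prev_digit:
--             count += 1
--         elif prev_digit is not None:
--             if count == 1:
--                 return True
--             count = 0
--         prev_digit = digit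
--     return True if count == 1 else False
-- ===== SOURCE B (Python) =====
-- def two_consec(s: str) -> bool:
--     n = len(s)
--     return any(
--         s[i] == s[i + 1]
--         and (i == 0 or s[i - 1] != s[i])
--         and (i + 2 == n or s[i + 2] != s[i])
--         for i in range(n - 1)
--     )
-- ===== Notes on version B (the rewrite author's own statement) =====
-- stated objective: alternative
-- what changed: Replaces A's prev_digit/count state machine (run-length counting with early return) by a stateless positional test: any index i where s[i]==s[i+1] and the pair is bounded on both sides by a differing char or the string edge.
import Mathlib
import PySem

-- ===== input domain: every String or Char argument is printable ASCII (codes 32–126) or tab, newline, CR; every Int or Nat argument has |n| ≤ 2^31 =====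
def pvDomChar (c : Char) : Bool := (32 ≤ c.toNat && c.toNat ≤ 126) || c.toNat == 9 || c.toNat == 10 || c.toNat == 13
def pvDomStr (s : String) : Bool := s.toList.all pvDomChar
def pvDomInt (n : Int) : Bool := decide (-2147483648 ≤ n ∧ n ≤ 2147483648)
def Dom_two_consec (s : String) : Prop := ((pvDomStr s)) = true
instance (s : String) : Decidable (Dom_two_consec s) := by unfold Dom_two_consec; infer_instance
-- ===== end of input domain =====

-- B drops A's run-counting state machine for a stateless positional test: some adjacent
-- equal pair that is bounded on both sides by a differing char or the string edge (alternative, same cost).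

-- ===== PORT A =====
-- A's loop with early return: state (prev_digit, count), transliterated as structural recursion.
def twoConsecGo (prev : Option Char) (count : Nat) : List Char → Bool
  | [] => count == 1
  | d :: rest =>
    if some d == prev then
      twoConsecGo (some d) (count + 1) rest
    else
      match prev with
      | none => twoConsecGo (some d) count rest
      | some _ =>
        if count == 1 then true
        else twoConsecGo (some d) 0 rest

def two_consec (s : String) : Bool := twoConsecGo none 0 s.toList

-- ===== PORT B =====
-- B's generator: for i in range(n-1), test the boundary pattern at i.
-- All Python index accesses are with indices in 0..n-1 (short-circuit keeps i-1, i+1, i+2 in range),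
-- so List.getD with a dummy default is exact here.
def altP (l : List Char) (i : Nat) : Bool :=
  (l.getD i ' ' == l.getD (i + 1) ' ')
    && ((i == 0) || !(l.getD (i - 1) ' ' == l.getD i ' '))
    && ((i + 2 == l.length) || !(l.getD (i + 2) ' ' == l.getD i ' '))

def two_consec_alt (s : String) : Bool :=
  (List.range (s.toList.length - 1)).any (altP s.toList)

-- ===== PRECONDITION & SPEC =====
def Spec_two_consec (s : String) (out : Bool) : Prop := out = two_consec_alt s
instance (s : String) (out : Bool) : Decidable (Spec_two_consec s out) := by unfold Spec_two_consec; infer_instance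

-- ===== CLAIM (what is proved, stated in full; the proofs are below) =====
def Claim_equal_two_consec : Prop := ∀ (s : String), Dom_two_consec s → Spec_two_consec s (two_consec s)

-- ===== LEMMAS AND PROOFS =====

-- maximal runs of identical characters, the common intermediate description of both programs
def pyGroups : List Char → List (List Char)
  | [] => []
  | c :: rest =>
    (c :: rest.takeWhile (· == c)) :: pyGroups (rest.dropWhile (· == c))
termination_by l => l.length
decreasing_by
  simpa using Nat.lt_succ_of_le (List.length_dropWhile_le (· == c) rest)

-- Running A's loop inside a run of `c` already `count` long (beyond the first char):
-- the run contributes `count + takeWhile.length == 1`, then the loop restarts fresh on the rest.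
theorem twoConsecGo_some (c : Char) (k : Nat) (rest : List Char) :
    twoConsecGo (some c) k rest =
      ((k + (rest.takeWhile (· == c)).length == 1)
        || twoConsecGo none 0 (rest.dropWhile (· == c))) := by
  induction rest generalizing k with
  | nil => simp [twoConsecGo]
  | cons x xs ih =>
    by_cases hx : x = c
    · subst hx
      simp only [twoConsecGo, List.takeWhile_cons, List.dropWhile_cons]
      simp only [beq_self_eq_true, if_true, List.length_cons]
      rw [ih]
      congr 1
      simp
      omega
    · have hxc : (x == c) = false := by simp [hx]
      simp only [twoConsecGo, List.takeWhile_cons, List.dropWhile_cons, hxc]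
      simp only [Bool.false_eq_true]
      have h2 : ((some x : Option Char) == some c) = false := by simp [hx]
      by_cases hk : k = 1
      · simp [twoConsecGo, h2, hk]
      · have hk' : (k == 1) = false := by simp [hk]
        simp [twoConsecGo, h2, hk']

theorem twoConsecGo_groups (l : List Char) :
    twoConsecGo none 0 l = (pyGroups l).any (fun g => g.length == 2) := by
  induction hn : l.length using Nat.strong_induction_on generalizing l with
  | _ n ih =>
    cases l with
    | nil => simp [twoConsecGo, pyGroups]
    | cons c rest =>
      have hstep : twoConsecGo none 0 (c :: rest) = twoConsecGo (some c) 0 rest := by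
        simp [twoConsecGo]
      rw [hstep, twoConsecGo_some]
      rw [pyGroups]
      simp only [List.any_cons]
      have hrec := ih ((rest.dropWhile (· == c)).length)
        (by subst hn; simpa using Nat.lt_succ_of_le (List.length_dropWhile_le (· == c) rest))
        (rest.dropWhile (· == c)) rfl
      rw [hrec]
      congr 1
      simp

-- B's any equals the run-length description too
theorem beqNat_congr (a b c d : Nat) (h : a = b ↔ c = d) : (a == b) = (c == d) := by
  by_cases hc : c = d
  · simp [hc, h.mpr hc]
  · have ha : ¬ a = b := fun hh => hc (h.mp hh)
    simp [hc, ha]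

theorem any_congr_mem {α : Type} (l : List α) (f g : α → Bool)
    (h : ∀ x ∈ l, f x = g x) : l.any f = l.any g := by
  induction l with
  | nil => rfl
  | cons x xs ih =>
    simp only [List.any_cons, h x (List.mem_cons_self ..),
      ih (fun y hy => h y (List.mem_cons_of_mem _ hy))]

theorem any_range_head (n : Nat) (f : Nat → Bool) (hn : 0 < n)
    (h : ∀ i, 1 ≤ i → i < n → f i = false) : (List.range n).any f = f 0 := by
  cases hf : f 0
  · apply List.any_eq_false.mpr
    intro x hx
    simp only [List.mem_range] at hx
    cases x with
    | zero => simp [hf]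
    | succ k => simp [h _ (Nat.succ_le_succ (Nat.zero_le _)) hx]
  · exact List.any_eq_true.mpr ⟨0, List.mem_range.mpr hn, hf⟩

theorem getD_run (c : Char) (tw d : List Char) (htw : ∀ x ∈ tw, x = c)
    {i : Nat} (hi : i ≤ tw.length) : ((c :: tw) ++ d).getD i ' ' = c := by
  have hlen : i < (c :: tw).length := by simp; omega
  rw [List.getD_append _ _ _ _ hlen, List.getD_eq_getElem _ _ hlen]
  have hm := List.getElem_mem hlen
  rcases List.mem_cons.mp hm with h | h
  · exact h
  · exact htw _ h

theorem getD_shift (c : Char) (tw d : List Char) (j : Nat) :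
    ((c :: tw) ++ d).getD (tw.length + 1 + j) ' ' = d.getD j ' ' := by
  rw [List.getD_append_right]
  · have : tw.length + 1 + j - (c :: tw).length = j := by simp
    rw [this]
  · simp

-- one pyGroups step seen through B's positional test
theorem altAny_step (c : Char) (tw d : List Char)
    (htw : ∀ x ∈ tw, x = c) (hd : d ≠ [] → d.getD 0 ' ' ≠ c) :
    (List.range (((c :: tw) ++ d).length - 1)).any (altP ((c :: tw) ++ d))
      = ((tw.length + 1 == 2) || (List.range (d.length - 1)).any (altP d)) := by
  have hlen : ((c :: tw) ++ d).length = tw.length + 1 + d.length := by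
    simp only [List.length_append, List.length_cons]
  have hmid : ∀ i, 1 ≤ i → i ≤ tw.length → altP ((c :: tw) ++ d) i = false := by
    intro i h1 h2
    have e1 : ((c :: tw) ++ d).getD (i-1) ' ' = c := getD_run c tw d htw (by omega)
    have e2 : ((c :: tw) ++ d).getD i ' ' = c := getD_run c tw d htw h2
    have h0 : (i == 0) = false := by simp; omega
    simp only [altP]
    rw [e1, e2, h0]
    simp
  have e0 : ((c :: tw) ++ d).getD 0 ' ' = c := getD_run c tw d htw (Nat.zero_le _)
  cases d with
  | nil =>
    simp only [List.length_nil, Nat.zero_sub, List.range_zero, List.any_nil, Bool.or_false]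
    rcases Nat.eq_zero_or_pos tw.length with h0 | hpos
    · simp [h0]
    · have hr : ((c :: tw) ++ ([]:List Char)).length - 1 = tw.length := by
        rw [hlen]; simp
      rw [hr, any_range_head tw.length _ hpos
        (fun i h1 h2 => hmid i h1 (Nat.le_of_lt h2))]
      have e1 : ((c :: tw) ++ ([]:List Char)).getD 1 ' ' = c := getD_run c tw [] htw hpos
      simp only [altP, Nat.zero_add, Nat.zero_sub]
      rw [e0, e1]
      by_cases h1 : tw.length = 1
      · have e2 : (2 == ((c :: tw) ++ ([]:List Char)).length) = true := by
          rw [hlen]; simp [h1]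
        rw [e2]
        simp [h1]
      · have e2 : (2 == ((c :: tw) ++ ([]:List Char)).length) = false := by
          rw [hlen]; simp; omega
        have e3 : ((c :: tw) ++ ([]:List Char)).getD 2 ' ' = c := getD_run c tw [] htw (by omega)
        rw [e2, e3]
        have e4 : (tw.length + 1 == 2) = false := by simp; omega
        rw [e4]
        simp
  | cons x xs =>
    have hxc : x ≠ c := by
      have := hd (by simp)
      simpa using this
    have hcx : (c == x) = false := by
      simp only [beq_eq_false_iff_ne, ne_eq]
      exact fun h => hxc h.symm
    have hxc' : (x == c) = false := by simp [hxc]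
    have hr : ((c :: tw) ++ (x :: xs)).length - 1 = (tw.length + 1) + xs.length := by
      rw [hlen]; simp
    rw [hr, List.range_add, List.any_append, List.any_map]
    have part1 : (List.range (tw.length + 1)).any (altP ((c :: tw) ++ (x :: xs)))
        = (tw.length + 1 == 2) := by
      rw [any_range_head (tw.length + 1) _ (Nat.succ_pos _)
        (fun i h1 h2 => hmid i h1 (by omega))]
      simp only [altP, Nat.zero_add, Nat.zero_sub]
      rw [e0]
      rcases Nat.eq_zero_or_pos tw.length with h0 | hpos
      · have e1 : ((c :: tw) ++ (x :: xs)).getD 1 ' ' = x := by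
          have := getD_shift c tw (x :: xs) 0
          rw [h0] at this
          simpa using this
        rw [e1, hcx]
        simp [h0]
      · have e1 : ((c :: tw) ++ (x :: xs)).getD 1 ' ' = c := getD_run c tw (x :: xs) htw hpos
        have e3 : (2 == ((c :: tw) ++ (x :: xs)).length) = false := by
          rw [hlen]; simp; omega
        rw [e1, e3]
        by_cases h1 : tw.length = 1
        · have e2 : ((c :: tw) ++ (x :: xs)).getD 2 ' ' = x := by
            have := getD_shift c tw (x :: xs) 0
            rw [h1] at this
            simpa using this
          rw [e2, hxc']
          simp [h1]
        · have e2 : ((c :: tw) ++ (x :: xs)).getD 2 ' ' = c := getD_run c tw (x :: xs) htw (by omega)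
          rw [e2]
          have e4 : (tw.length + 1 == 2) = false := by simp; omega
          rw [e4]
          simp
    have part2 : (List.range xs.length).any (altP ((c :: tw) ++ (x :: xs)) ∘ (fun j => tw.length + 1 + j))
        = (List.range ((x :: xs).length - 1)).any (altP (x :: xs)) := by
      have hr2 : (x :: xs).length - 1 = xs.length := by simp
      rw [hr2]
      apply any_congr_mem
      intro j _
      have eA : ((c :: tw) ++ (x :: xs)).getD (tw.length + 1 + j) ' ' = (x :: xs).getD j ' ' :=
        getD_shift c tw (x :: xs) j
      have eB : ((c :: tw) ++ (x :: xs)).getD (tw.length + 1 + j + 1) ' ' = (x :: xs).getD (j + 1) ' ' := by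
        have := getD_shift c tw (x :: xs) (j + 1)
        rw [show tw.length + 1 + j + 1 = tw.length + 1 + (j + 1) from by omega]
        exact this
      have eC : ((c :: tw) ++ (x :: xs)).getD (tw.length + 1 + j + 2) ' ' = (x :: xs).getD (j + 2) ' ' := by
        have := getD_shift c tw (x :: xs) (j + 2)
        rw [show tw.length + 1 + j + 2 = tw.length + 1 + (j + 2) from by omega]
        exact this
      have eL : (tw.length + 1 + j + 2 == ((c :: tw) ++ (x :: xs)).length)
          = (j + 2 == (x :: xs).length) := by
        apply beqNat_congr
        rw [hlen]
        omega
      simp only [Function.comp, altP]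
      rw [eA, eB, eC, eL]
      cases j with
      | zero =>
        have eM : ((c :: tw) ++ (x :: xs)).getD (tw.length + 1 + 0 - 1) ' ' = c :=
          getD_run c tw (x :: xs) htw (by omega)
        have eN : (x :: xs).getD 0 ' ' = x := rfl
        have hz : (tw.length + 1 + 0 == 0) = false := by simp
        rw [eM, hz, eN]
        simp [hcx]
      | succ k =>
        have eM : ((c :: tw) ++ (x :: xs)).getD (tw.length + 1 + (k + 1) - 1) ' '
            = (x :: xs).getD k ' ' := by
          have := getD_shift c tw (x :: xs) k
          rw [show tw.length + 1 + (k + 1) - 1 = tw.length + 1 + k from by omega]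
          exact this
        have hz : (tw.length + 1 + (k + 1) == 0) = false := by simp
        have hk0 : ((k : Nat) + 1 == 0) = false := by simp
        rw [eM, hz, hk0]
        simp
    rw [part1, part2]

theorem altAny_groups (l : List Char) :
    (List.range (l.length - 1)).any (altP l) = (pyGroups l).any (fun g => g.length == 2) := by
  induction hn : l.length using Nat.strong_induction_on generalizing l with
  | _ n ih =>
    cases l with
    | nil =>
      subst hn
      simp [pyGroups]
    | cons c rest =>
      subst hn
      have hsplit : c :: rest = (c :: rest.takeWhile (· == c)) ++ rest.dropWhile (· == c) := by
        simp [List.takeWhile_append_dropWhile]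
      have htw : ∀ x ∈ rest.takeWhile (· == c), x = c := by
        intro x hx
        simpa using List.mem_takeWhile_imp hx
      have hd : rest.dropWhile (· == c) ≠ [] → (rest.dropWhile (· == c)).getD 0 ' ' ≠ c := by
        intro hne
        have hh := List.head_dropWhile_not (· == c) hne
        cases hdw : rest.dropWhile (· == c) with
        | nil => exact absurd hdw hne
        | cons y ys =>
          simp only [hdw, List.head_cons] at hh
          simpa [hdw] using hh
      rw [pyGroups]
      simp only [List.any_cons, List.length_cons]
      have hrec := ih ((rest.dropWhile (· == c)).length)
        (by simpa using Nat.lt_succ_of_le (List.length_dropWhile_le (· == c) rest))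
        (rest.dropWhile (· == c)) rfl
      rw [← hrec]
      have hL : rest.length + 1 = ((c :: List.takeWhile (fun x => x == c) rest)
          ++ List.dropWhile (fun x => x == c) rest).length := by
        rw [← hsplit, List.length_cons]
      rw [hL, hsplit, altAny_step c _ _ htw hd]

-- ===== VERDICT (by name: the statement is the Claim_ definition above) =====
theorem two_consec_spec : Claim_equal_two_consec := by
  intro s _
  unfold Spec_two_consec two_consec two_consec_alt
  rw [twoConsecGo_groups, altAny_groups]
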